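-- pv_equiv track=rewrite | github.com/physicalattraction/solvers | src/towers.py | visible_from_line
-- ===== SOURCE A (Python) =====
-- from typing import Collection, Dict, List
--
-- def visible_from_line(line: Collection[int], reverse: bool = False) -> int:
--     """
--     Return how many towers are visible from the given line
--
--     >>> visible_from_line([1, 2, 3, 4])
--     4
--     >>> visible_from_line([1, 4, 3, 2])
--     2
--     """
--
--     visible = 0
--     highest_seen = 0
--     for number in reversed(line) if reverse else line:
--         if number > highest_seen:
--             visible += 1
--             highest_seen = number
--     return visible
-- ===== SOURCE B (Python) =====
-- def visible_from_line(line, reverse=False):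
--     seq = list(line)
--     if reverse:
--         seq.reverse()
--     # pass 1: running maximum, seeded with 0
--     prefix = [0]
--     for x in seq:
--         prefix.append(max(prefix[-1], x))
--     # pass 2: each strict increase of the running maximum is a newly visible tower
--     return sum(cur > prev for prev, cur in zip(prefix, prefix[1:]))
-- ===== Notes on version B (the rewrite author's own statement) =====
-- stated objective: alternative
-- what changed: B replaces A's single stateful loop (counter plus highest-seen variable updated under a branch) by two separate passes: first materialize the 0-seeded running-maximum sequence, then count the positions where it strictly increases.
import Mathlib
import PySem

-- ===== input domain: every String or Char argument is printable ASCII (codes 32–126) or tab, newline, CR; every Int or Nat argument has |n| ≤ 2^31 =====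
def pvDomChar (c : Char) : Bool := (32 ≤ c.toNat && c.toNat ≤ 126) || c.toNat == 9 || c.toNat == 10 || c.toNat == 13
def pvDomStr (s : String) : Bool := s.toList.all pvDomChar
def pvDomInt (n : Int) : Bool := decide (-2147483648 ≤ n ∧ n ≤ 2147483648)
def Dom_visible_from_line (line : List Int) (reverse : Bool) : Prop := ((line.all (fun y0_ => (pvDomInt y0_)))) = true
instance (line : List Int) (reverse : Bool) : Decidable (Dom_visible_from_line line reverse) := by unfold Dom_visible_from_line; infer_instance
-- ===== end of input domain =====

-- ===== PORT A =====
def visible_from_line (line : List Int) (reverse : Bool) : Int :=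
  ((if reverse then line.reverse else line).foldl
    (fun s number => if number > s.2 then (s.1 + 1, number) else s) ((0 : Int), (0 : Int))).1

-- ===== PORT B =====
-- running-maximum tail: pref cur xs lists prefix[1:], where cur is prefix[-1] so far
def prefTail (cur : Int) : List Int → List Int
  | [] => []
  | x :: t => max cur x :: prefTail (max cur x) t

def visible_from_line_alt (line : List Int) (reverse : Bool) : Int :=
  let seq := if reverse then line.reverse else line
  let prefx := (0 : Int) :: prefTail 0 seq
  (prefx.zip prefx.tail).foldl (fun c p => if p.2 > p.1 then c + 1 else c) (0 : Int)

-- ===== PRECONDITION & SPEC =====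
def Spec_visible_from_line (line : List Int) (reverse : Bool) (out : Int) : Prop := out = visible_from_line_alt line reverse
instance (line : List Int) (reverse : Bool) (out : Int) : Decidable (Spec_visible_from_line line reverse out) := by unfold Spec_visible_from_line; infer_instance

-- ===== CLAIM (what is proved, stated in full; the proofs are below) =====
def Claim_equal_visible_from_line : Prop := ∀ (line : List Int) (reverse : Bool), Dom_visible_from_line line reverse → Spec_visible_from_line line reverse (visible_from_line line reverse)

-- ===== LEMMAS AND PROOFS =====
theorem key (seq : List Int) (h v : Int) :
    (seq.foldl (fun s number => if number > s.2 then (s.1 + 1, number) else s) (v, h)).1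
      = ((h :: prefTail h seq).zip (prefTail h seq)).foldl
          (fun c p => if p.2 > p.1 then c + 1 else c) v := by
  induction seq generalizing h v with
  | nil => simp [prefTail]
  | cons x t ih =>
    simp only [List.foldl_cons, prefTail, List.zip_cons_cons]
    by_cases hx : x > h
    · have hm : max h x = x := max_eq_right hx.le
      simp only [hm, if_pos hx]
      exact ih x (v + 1)
    · have hm : max h x = h := max_eq_left (not_lt.mp hx)
      simp only [hm, if_neg hx, if_neg (lt_irrefl h)]
      exact ih h v

-- ===== VERDICT (by name: the statement is the Claim_ definition above) =====
theorem visible_from_line_spec : Claim_equal_visible_from_line := by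
  intro line reverse _
  unfold Spec_visible_from_line visible_from_line visible_from_line_alt
  exact key _ 0 0
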